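-- pv_equiv track=rewrite | github.com/JasonMates/Twitch-Summarizer | src/prep_data.py | squash_repeated_tokens
-- ===== SOURCE A (Python) =====
-- def squash_repeated_tokens(text: str, max_repeat: int = 2) -> str:
--     toks = text.split()
--     if not toks:
--         return text
--     out = []
--     prev = None
--     run = 0
--     for t in toks:
--         tl = t.lower()
--         if tl == prev:
--             run += 1
--         else:
--             prev = tl
--             run = 1
--         if run <= max_repeat:
--             out.append(t)
--     return " ".join(out)
-- ===== SOURCE B (Python) =====
-- def squash_repeated_tokens(text: str, max_repeat: int = 2) -> str:
--     toks = text.split()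
--     if not toks:
--         return text
--     k = max(max_repeat, 0)
--     lows = [t.lower() for t in toks]
--     kept = [toks[i] for i in range(len(toks))
--             if i < k or any(lows[j] != lows[i] for j in range(i - k, i))]
--     return " ".join(kept)
-- ===== Notes on version B (the rewrite author's own statement) =====
-- stated objective: alternative
-- what changed: Replaces A's prev/run-counter state machine with a stateless per-index filter: token i is kept iff i < k or some of the k preceding lowercased tokens differs from token i's lowercase (k = max(max_repeat,0)).
import Mathlib
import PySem

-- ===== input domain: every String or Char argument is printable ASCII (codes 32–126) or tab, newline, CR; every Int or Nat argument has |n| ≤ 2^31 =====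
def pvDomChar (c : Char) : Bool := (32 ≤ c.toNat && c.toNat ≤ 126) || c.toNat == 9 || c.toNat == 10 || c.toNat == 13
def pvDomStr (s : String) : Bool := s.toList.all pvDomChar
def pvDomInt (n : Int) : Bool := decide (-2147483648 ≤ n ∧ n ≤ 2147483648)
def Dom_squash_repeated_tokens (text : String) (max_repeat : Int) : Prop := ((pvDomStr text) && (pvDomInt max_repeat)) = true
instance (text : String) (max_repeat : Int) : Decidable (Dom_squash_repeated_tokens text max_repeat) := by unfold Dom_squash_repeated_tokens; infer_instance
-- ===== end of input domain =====

-- B replaces A's prev/run-counter state machine by a stateless per-index window test: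
-- token i is kept iff i < k or one of the k preceding lowercased tokens differs from
-- token i's lowercase (k = max(max_repeat,0)); same result, different decomposition
-- (objective: alternative).

-- ===== PORT A =====
-- A's loop: state (out, prev, run) over the tokens, appending t while run ≤ max_repeat.
def pvALoop (max_repeat : Int) : List String → List String → Option String → Int → List String
  | [], out, _, _ => out
  | t :: rest, out, prev, run =>
    let tl := PySem.Str.lower t
    if some tl = prev then
      let run' := run + 1
      pvALoop max_repeat rest (if run' ≤ max_repeat then out ++ [t] else out) prev run'
    else
      pvALoop max_repeat rest (if (1 : Int) ≤ max_repeat then out ++ [t] else out) (some tl) 1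

def squash_repeated_tokens (text : String) (max_repeat : Int) : String :=
  let toks := PySem.Str.split₀ text
  if toks = [] then text
  else PySem.Str.join " " (pvALoop max_repeat toks [] none 0)

-- ===== PORT B =====
-- Source B's keep-condition on index i: `i < k or any(lows[j] != lows[i] for j in range(i-k, i))`.
-- When the `any` is evaluated, i ≥ k ≥ 0, so range(i-k, i) is the k indices i-k..i-1 and every
-- lows[j] access is in range (ported via getD); when i < k the left disjunct already decides.
def pvBCond (k : Nat) (lows : List String) (i : Nat) : Bool :=
  decide (i < k) || (List.range' (i - k) k).any (fun j => lows.getD j "" != lows.getD i "")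

def squash_repeated_tokens_alt (text : String) (max_repeat : Int) : String :=
  let toks := PySem.Str.split₀ text
  if toks = [] then text
  else
    let k := (max max_repeat 0).toNat
    let lows := toks.map PySem.Str.lower
    let kept := (List.range toks.length).filterMap
      (fun i => if pvBCond k lows i then some (toks.getD i "") else none)
    PySem.Str.join " " kept

-- ===== PRECONDITION & SPEC =====
def Spec_squash_repeated_tokens (text : String) (max_repeat : Int) (out : String) : Prop := out = squash_repeated_tokens_alt text max_repeat
instance (text : String) (max_repeat : Int) (out : String) : Decidable (Spec_squash_repeated_tokens text max_repeat out) := by unfold Spec_squash_repeated_tokens; infer_instance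

-- ===== CLAIM (what is proved, stated in full; the proofs are below) =====
def Claim_equal_squash_repeated_tokens : Prop := ∀ (text : String) (max_repeat : Int), Dom_squash_repeated_tokens text max_repeat → Spec_squash_repeated_tokens text max_repeat (squash_repeated_tokens text max_repeat)

-- ===== LEMMAS AND PROOFS =====

-- length of the maximal run of equal (lowercased) tokens ending at index i
def pvRunlen (lows : List String) : Nat → Nat
  | 0 => 1
  | i+1 => if lows.getD (i+1) "" = lows.getD i "" then pvRunlen lows i + 1 else 1

theorem pvRunlen_pos (lows : List String) (i : Nat) : 1 ≤ pvRunlen lows i := by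
  cases i with
  | zero => simp [pvRunlen]
  | succ i' => simp only [pvRunlen]; split <;> omega

theorem pvRunlen_char (lows : List String) (k : Nat) :
    ∀ i, k < pvRunlen lows i ↔ (k ≤ i ∧ ∀ j ≤ k, lows.getD (i - j) "" = lows.getD i "") := by
  induction k with
  | zero =>
    intro i
    constructor
    · intro _
      refine ⟨Nat.zero_le _, ?_⟩
      intro j hj
      interval_cases j
      simp
    · intro _; exact pvRunlen_pos lows i
  | succ k ih =>
    intro i
    cases i with
    | zero =>
      simp only [pvRunlen]
      constructor
      · omega
      · rintro ⟨h, _⟩; omega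
    | succ i' =>
      simp only [pvRunlen]
      by_cases h : lows.getD (i' + 1) "" = lows.getD i' ""
      · rw [if_pos h]
        constructor
        · intro hlt
          have hk : k < pvRunlen lows i' := by omega
          obtain ⟨hki, hall⟩ := (ih i').mp hk
          refine ⟨by omega, ?_⟩
          intro j hj
          cases j with
          | zero => simp
          | succ j' =>
            have : i' + 1 - (j' + 1) = i' - j' := by omega
            rw [this, h]
            exact hall j' (by omega)
        · rintro ⟨hki, hall⟩
          have hk : k < pvRunlen lows i' := by
            refine (ih i').mpr ⟨by omega, ?_⟩
            intro j hj
            have := hall (j + 1) (by omega)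
            have he : i' + 1 - (j + 1) = i' - j := by omega
            rw [he, h] at this
            exact this
          omega
      · rw [if_neg h]
        constructor
        · omega
        · rintro ⟨hki, hall⟩
          exfalso
          have := hall 1 (by omega)
          simp only [Nat.add_sub_cancel] at this
          exact h this.symm

theorem pvRunlen_le (lows : List String) (i : Nat) : pvRunlen lows i ≤ i + 1 := by
  by_contra hc
  have := (pvRunlen_char lows (i + 1) i).mp (by omega)
  omega

-- B's keep-condition at index i holds exactly when A would keep token i (run length ≤ max_repeat)
theorem pvBCond_iff (mr : Int) (lows : List String) (i : Nat) :
    pvBCond (max mr 0).toNat lows i = true ↔ (pvRunlen lows i : Int) ≤ mr := by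
  by_cases hmr : 1 ≤ mr
  · set k := (max mr 0).toNat with hk
    have hkmr : (k : Int) = mr := by omega
    have hk1 : 1 ≤ k := by omega
    have hrw : ((pvRunlen lows i : Int) ≤ mr) ↔ pvRunlen lows i ≤ k := by
      rw [← hkmr]; exact_mod_cast Iff.rfl
    rw [hrw]
    unfold pvBCond
    rw [Bool.or_eq_true, List.any_eq_true]
    constructor
    · rintro (hik | ⟨j', hj', hne⟩)
      · have := pvRunlen_le lows i
        simp at hik
        omega
      · by_contra hgt
        push Not at hgt
        obtain ⟨hki, hall⟩ := (pvRunlen_char lows k i).mp hgt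
        rw [List.mem_range'_1] at hj'
        have h1 : i - k ≤ j' := hj'.1
        have h2 : j' < i := by omega
        have := hall (i - j') (by omega)
        have he : i - (i - j') = j' := by omega
        rw [he] at this
        simp only [bne_iff_ne, ne_eq] at hne
        exact hne this
    · intro hle
      by_cases hik : i < k
      · exact Or.inl (by simpa using hik)
      · push Not at hik
        right
        have hnot : ¬ k < pvRunlen lows i := by omega
        rw [pvRunlen_char] at hnot
        push Not at hnot
        obtain ⟨j, hj, hne⟩ := hnot hik
        have hj1 : 1 ≤ j := by
          by_contra h0
          push Not at h0
          interval_cases j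
          simp at hne
        refine ⟨i - j, ?_, ?_⟩
        · rw [List.mem_range'_1]
          omega
        · simp only [bne_iff_ne, ne_eq]
          exact hne
  · have hk0 : (max mr 0).toNat = 0 := by omega
    rw [hk0]
    unfold pvBCond
    simp only [List.range'_zero, List.any_nil, Bool.or_false, decide_eq_true_eq]
    have := pvRunlen_pos lows i
    constructor
    · omega
    · intro h; exfalso; omega

-- B's kept tokens from index i on
def pvKeptFrom (mr : Int) (toks : List String) (i : Nat) : List String :=
  (List.range' i (toks.length - i)).filterMap
    (fun idx => if pvBCond (max mr 0).toNat (toks.map PySem.Str.lower) idx then some (toks.getD idx "") else none)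

theorem pvKeptFrom_step (mr : Int) (toks : List String) (i : Nat) (h : i < toks.length) :
    pvKeptFrom mr toks i
      = (if pvBCond (max mr 0).toNat (toks.map PySem.Str.lower) i then [toks.getD i ""] else [])
        ++ pvKeptFrom mr toks (i + 1) := by
  unfold pvKeptFrom
  have hn : toks.length - i = (toks.length - (i + 1)) + 1 := by omega
  rw [hn, List.range'_succ, List.filterMap_cons]
  by_cases hb : pvBCond (max mr 0).toNat (toks.map PySem.Str.lower) i = true
  · simp [hb]
  · simp [hb]

theorem pvMapLower_getD (toks : List String) (i : Nat) (h : i < toks.length) :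
    (toks.map PySem.Str.lower).getD i "" = PySem.Str.lower (toks.getD i "") := by
  rw [List.getD_eq_getElem?_getD, List.getD_eq_getElem?_getD, List.getElem?_map]
  rw [List.getElem?_eq_getElem h]
  simp

-- A's loop from index i (i ≥ 1) with the invariant state equals B's kept tokens from i
theorem pvALoop_eq (mr : Int) (toks : List String) :
    ∀ m i out, toks.length - i = m → 1 ≤ i →
      pvALoop mr (toks.drop i) out (some ((toks.map PySem.Str.lower).getD (i - 1) ""))
          ((pvRunlen (toks.map PySem.Str.lower) (i - 1) : Int))
        = out ++ pvKeptFrom mr toks i := by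
  intro m
  induction m with
  | zero =>
    intro i out hm _
    have hd : toks.drop i = [] := List.drop_eq_nil_of_le (by omega)
    have hr : toks.length - i = 0 := hm
    rw [hd]
    unfold pvKeptFrom
    rw [hr]
    simp [pvALoop]
  | succ m ih =>
    intro i out hm h1
    have hi : i < toks.length := by omega
    set lows := toks.map PySem.Str.lower with hlows
    have hd : toks.drop i = toks[i] :: toks.drop (i + 1) := List.drop_eq_getElem_cons hi
    have hgd : toks[i] = toks.getD i "" := by
      rw [List.getD_eq_getElem?_getD, List.getElem?_eq_getElem hi]; rfl
    have htl : PySem.Str.lower toks[i] = lows.getD i "" := by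
      rw [hgd, hlows, pvMapLower_getD toks i hi]
    have hrun : pvRunlen lows i
        = if lows.getD i "" = lows.getD (i - 1) "" then pvRunlen lows (i - 1) + 1 else 1 := by
      have : i = (i - 1) + 1 := by omega
      rw [this]
      simp only [pvRunlen, Nat.add_sub_cancel]
    rw [hd]
    simp only [pvALoop, htl]
    by_cases heq : lows.getD i "" = lows.getD (i - 1) ""
    · rw [if_pos (by rw [heq])]
      have hrun' : (pvRunlen lows (i - 1) : Int) + 1 = (pvRunlen lows i : Int) := by
        rw [hrun, if_pos heq]; push_cast; ring
      rw [hrun', show lows.getD (i - 1) "" = lows.getD i "" from heq.symm]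
      have hstep := ih (i + 1) (if (pvRunlen lows i : Int) ≤ mr then out ++ [toks[i]] else out)
        (by omega) (by omega)
      simp only [Nat.add_sub_cancel] at hstep
      rw [hstep]
      rw [pvKeptFrom_step mr toks i hi]
      rw [← hlows]
      by_cases hc : (pvRunlen lows i : Int) ≤ mr
      · rw [if_pos hc, if_pos ((pvBCond_iff mr lows i).mpr hc), hgd]
        simp
      · rw [if_neg hc, if_neg (by
          intro hb
          exact hc ((pvBCond_iff mr lows i).mp hb))]
        simp
    · rw [if_neg (by
        intro hs
        exact heq (Option.some.injEq _ _ ▸ hs : lows.getD i "" = lows.getD (i - 1) ""))]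
      have hrl : pvRunlen lows i = 1 := by
        rw [hrun, if_neg heq]
      have hstep := ih (i + 1) (if (1 : Int) ≤ mr then out ++ [toks[i]] else out)
        (by omega) (by omega)
      simp only [Nat.add_sub_cancel] at hstep
      rw [hrl] at hstep
      push_cast at hstep
      rw [hstep]
      rw [pvKeptFrom_step mr toks i hi]
      rw [← hlows]
      have hciff : pvBCond (max mr 0).toNat lows i = true ↔ (1 : Int) ≤ mr := by
        rw [pvBCond_iff mr lows i, hrl]; push_cast; exact Iff.rfl
      by_cases hc : (1 : Int) ≤ mr
      · rw [if_pos hc, if_pos (hciff.mpr hc), hgd]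
        simp
      · rw [if_neg hc, if_neg (fun hb => hc (hciff.mp hb))]
        simp

theorem pvALoop_full (mr : Int) (toks : List String) (h : toks ≠ []) :
    pvALoop mr toks [] none 0 = pvKeptFrom mr toks 0 := by
  obtain ⟨t, rest, rfl⟩ := List.exists_cons_of_ne_nil h
  set lows := (t :: rest).map PySem.Str.lower with hlows
  have h0 : PySem.Str.lower t = lows.getD 0 "" := by simp [hlows]
  have hrun0 : (1 : Int) = (pvRunlen lows 0 : Int) := by simp [pvRunlen]
  simp only [pvALoop, reduceCtorEq, if_false]
  rw [h0, hrun0]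
  have hstep := pvALoop_eq mr (t :: rest) ((t :: rest).length - 1) 1
    (if (pvRunlen lows 0 : Int) ≤ mr then [] ++ [t] else []) rfl le_rfl
  simp only [List.drop_one, List.tail_cons, Nat.sub_self] at hstep
  rw [← hlows] at hstep
  rw [hstep]
  rw [pvKeptFrom_step mr (t :: rest) 0 (by simp)]
  rw [← hlows]
  by_cases hc : (pvRunlen lows 0 : Int) ≤ mr
  · rw [if_pos hc, if_pos ((pvBCond_iff mr lows 0).mpr hc)]
    simp
  · rw [if_neg hc, if_neg (fun h => hc ((pvBCond_iff mr lows 0).mp h))]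

-- ===== VERDICT (by name: the statement is the Claim_ definition above) =====
theorem squash_repeated_tokens_spec : Claim_equal_squash_repeated_tokens := by
  intro text mr _
  unfold Spec_squash_repeated_tokens squash_repeated_tokens squash_repeated_tokens_alt
  by_cases h : PySem.Str.split₀ text = []
  · simp [h]
  · simp only [if_neg h]
    congr 1
    rw [pvALoop_full mr (PySem.Str.split₀ text) h]
    unfold pvKeptFrom
    rw [List.range_eq_range']
    simp
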